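-- pv_equiv track=rewrite | github.com/wuchen0901/algorithm | Knapsack.py | count_ordered_sums_unbounded
-- ===== SOURCE A (Python) =====
-- from typing import List, Counter, Dict
-- from typing import List
--
-- def count_ordered_sums_unbounded(nums: List[int], target: int) -> int:
--     """
--     Count the number of ORDERED sequences (permutations with repetition allowed)
--     drawn from `nums` that sum to `target`, where sequence length is between 1
--     and floor(target / min(nums)). This is intentionally order-sensitive:
--     e.g., with nums=[1,2], target=3, the sequences [1,2] and [2,1] are distinct.
--     类型：完全背包 · 排列计数（顺序敏感，等价“有序组合”/ compositions）。
--     典型特征：外层按 sum 或长度推进会计入不同顺序；[1,2] 与 [2,1] 视为两种。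
--     Type: Unbounded Knapsack · Permutation counting (order-sensitive, equivalent to compositions).
--     Typical characteristic: Outer loop by sum or length includes different orders; [1,2] and [2,1] are treated as two distinct ways.
--     """
--
--     max_len = target // min(nums)  # maximum sequence length allowed by smallest number
--
--     curr = Counter({0: 1})
--     cumulative = Counter(curr)
--
--     for _len in range(1, max_len + 1):
--         next_counter = Counter()
--         for s, ways in curr.items():
--             for n in nums:
--                 next_counter[s + n] += ways
--
--         cumulative += next_counter
--         curr = next_counter
--
--     return cumulative[target]
-- ===== SOURCE B (Python) =====
-- def count_ordered_sums_unbounded(nums, target):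
--     # Single running dict g: g[s] = number of sequences of length <= step
--     # summing to s (the cumulative count kept directly, re-seeded with the
--     # empty sequence each step), over the DISTINCT values of nums weighted
--     # by multiplicity; when all values are positive, sums that overshoot
--     # target can never come back down, so they are pruned.  A instead keeps
--     # two Counters (per-length + cumulative), scans every duplicate of nums
--     # separately and keeps every reachable sum.
--     m = min(nums)
--     steps = max(0, target // m)
--     mult = {}
--     for n in nums:
--         mult[n] = mult.get(n, 0) + 1
--     g = {0: 1}
--     for _ in range(steps):
--         ng = {0: 1}
--         for n, c in mult.items():
--             for s, w in g.items():
--                 t = s + n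
--                 if m > 0 and t > target:
--                     continue
--                 ng[t] = ng.get(t, 0) + c * w
--         g = ng
--     return g.get(target, 0)
-- ===== Notes on version B (the rewrite author's own statement) =====
-- stated objective: alternative
-- what changed: Replaced A's two-Counter scheme (per-length Counter rebuilt from every duplicate of nums, then merged into a cumulative Counter each round) by one running dict holding the cumulative counts directly (re-seeded with {0:1} each step), iterating over the distinct values of nums with multiplicities built once, and pruning sums that overshoot target when all values are positive.
import Mathlib
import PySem

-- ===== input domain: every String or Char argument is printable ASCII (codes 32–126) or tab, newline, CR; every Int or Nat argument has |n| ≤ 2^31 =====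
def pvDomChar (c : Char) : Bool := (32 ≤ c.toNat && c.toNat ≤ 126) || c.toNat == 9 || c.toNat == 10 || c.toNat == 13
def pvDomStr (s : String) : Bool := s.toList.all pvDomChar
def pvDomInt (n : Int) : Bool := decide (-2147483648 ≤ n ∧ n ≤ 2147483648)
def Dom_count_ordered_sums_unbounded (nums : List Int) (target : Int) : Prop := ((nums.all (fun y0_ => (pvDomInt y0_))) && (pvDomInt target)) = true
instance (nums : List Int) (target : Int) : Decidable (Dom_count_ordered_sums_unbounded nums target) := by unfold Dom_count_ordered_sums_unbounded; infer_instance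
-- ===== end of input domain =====

-- B replaces A's two-Counter per-length BFS by one running dict of cumulative counts over the distinct values of nums,
-- pruning sums that overshoot target when all values are positive (objective: alternative).


-- ===== PORT A =====
-- The Python Counters (dicts keyed by sums) are ported as Std.TreeMap Int Int: a PySem.Dict assoc list cannot be
-- evaluated in feasible time here (the Counters grow to thousands of keys).  The loops below follow A's loops
-- step for step; only the dict ITERATION ORDER differs from Python's insertion order, and the returned value —
-- a single lookup cumulative[target] — is proved independent of that order (invariant aLoop_inv below).

-- inner two loops: for (s, ways) in curr.items(): for n in nums: next_counter[s+n] += ways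
def aNext (nums : List Int) (curr : Std.TreeMap Int Int) : Std.TreeMap Int Int :=
  curr.toList.foldl
    (fun nx sw =>
      nums.foldl (fun nx n => nx.insert (sw.1 + n) (nx.getD (sw.1 + n) 0 + sw.2)) nx)
    ∅

-- cumulative += next_counter  (all counts here are positive, so Counter.__add__ is plain key-wise addition)
def aMerge (cum nx : Std.TreeMap Int Int) : Std.TreeMap Int Int :=
  nx.toList.foldl (fun c kv => c.insert kv.1 (c.getD kv.1 0 + kv.2)) cum

-- for _len in range(1, max_len + 1): the body does not use _len, so the loop is iteration count max(0, max_len)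
def aLoop (nums : List Int) : Nat → Std.TreeMap Int Int × Std.TreeMap Int Int
  | 0 => ((∅ : Std.TreeMap Int Int).insert 0 1, (∅ : Std.TreeMap Int Int).insert 0 1)
  | k + 1 =>
    let st := aLoop nums k
    let nx := aNext nums st.2
    (aMerge st.1 nx, nx)

def count_ordered_sums_unbounded (nums : List Int) (target : Int) : Int :=
  match PySem.List.min? nums (fun x => x) with
  | none => 0  -- Python: min([]) raises ValueError; excluded by Pre_
  | some m =>
    -- Python raises ZeroDivisionError iff m = 0; excluded by Pre_
    let maxLen := PySem.Int.floordiv target m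
    ((aLoop nums maxLen.toNat).1).getD target 0

-- ===== PORT B =====
-- B's dicts are ported as Std.TreeMap Int Int for the same reason as A's (see the comment above PORT A);
-- the returned single lookup g.get(target, 0) is proved independent of dict iteration order (bLoop_inv below).

-- mult[n] = mult.get(n, 0) + 1
def bMult (nums : List Int) : Std.TreeMap Int Int :=
  nums.foldl (fun d n => d.insert n (d.getD n 0 + 1)) ∅

-- one step: ng = {0: 1}; for n, c in mult.items(): for s, w in g.items(): skip overshoots if m > 0, else ng[s+n] += c*w
def bStep (m target : Int) (mult g : Std.TreeMap Int Int) : Std.TreeMap Int Int :=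
  mult.toList.foldl
    (fun ng nc =>
      g.toList.foldl
        (fun ng sw =>
          if 0 < m ∧ target < sw.1 + nc.1 then ng
          else ng.insert (sw.1 + nc.1) (ng.getD (sw.1 + nc.1) 0 + nc.2 * sw.2))
        ng)
    ((∅ : Std.TreeMap Int Int).insert 0 1)

-- for _ in range(steps): the body does not use the index, so the loop is its iteration count
def bLoop (m target : Int) (mult : Std.TreeMap Int Int) : Nat → Std.TreeMap Int Int
  | 0 => (∅ : Std.TreeMap Int Int).insert 0 1
  | k + 1 => bStep m target mult (bLoop m target mult k)

def count_ordered_sums_unbounded_alt (nums : List Int) (target : Int) : Int :=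
  match PySem.List.min? nums (fun x => x) with
  | none => 0  -- Python: min([]) raises ValueError; excluded by Pre_
  | some m =>
    -- Python raises ZeroDivisionError iff m = 0; excluded by Pre_
    let steps := max 0 (PySem.Int.floordiv target m)
    (bLoop m target (bMult nums) steps.toNat).getD target 0

-- ===== PRECONDITION & SPEC =====
-- Pre_ excludes exactly the inputs where A raises: nums = [] (ValueError in min) and min(nums) = 0,
-- i.e. 0 ∈ nums with no negative element (ZeroDivisionError in target // min(nums)).
def Pre_count_ordered_sums_unbounded (nums : List Int) (target : Int) : Prop :=
  nums ≠ [] ∧ ((0 : Int) ∈ nums → ∃ n ∈ nums, n < 0)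
instance (nums : List Int) (target : Int) : Decidable (Pre_count_ordered_sums_unbounded nums target) := by
  unfold Pre_count_ordered_sums_unbounded; infer_instance

def pvWitness_count_ordered_sums_unbounded : List Int × Int := ([1, 2], 4)

def Spec_count_ordered_sums_unbounded (nums : List Int) (target : Int) (out : Int) : Prop :=
  out = count_ordered_sums_unbounded_alt nums target
instance (nums : List Int) (target : Int) (out : Int) : Decidable (Spec_count_ordered_sums_unbounded nums target out) := by
  unfold Spec_count_ordered_sums_unbounded; infer_instance

-- ===== CLAIM =====
def Claim_equal_count_ordered_sums_unbounded : Prop :=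
  ∀ (nums : List Int) (target : Int), Dom_count_ordered_sums_unbounded nums target →
    Pre_count_ordered_sums_unbounded nums target →
    Spec_count_ordered_sums_unbounded nums target (count_ordered_sums_unbounded nums target)

-- ===== LEMMAS AND PROOFS =====

-- ways nums L s = number of length-L sequences of elements of nums summing to s;
-- cumWays nums k s sums these over lengths 0..k (both programs compute cumWays at target)
def ways (nums : List Int) : Nat → Int → Int
  | 0, s => if s = 0 then 1 else 0
  | L + 1, s => (nums.map (fun n => ways nums L (s - n))).sum

def cumWays (nums : List Int) (k : Nat) (s : Int) : Int :=
  ((List.range (k + 1)).map (fun l => ways nums l s)).sum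

-- ---- generic list sums ----
theorem sum_swap {α β : Type} (l1 : List α) (l2 : List β) (g : α → β → Int) :
    (l1.map (fun a => (l2.map (g a)).sum)).sum = (l2.map (fun b => (l1.map (fun a => g a b)).sum)).sum := by
  induction l1 with
  | nil => simp [List.sum_eq_zero]
  | cons x t ih => simp only [List.map_cons, List.sum_cons, ih, PySem.List.sum_map_add_int]

theorem sum_ite_count (c w : Int) : ∀ (ns : List Int), (ns.map (fun n => if n = c then w else 0)).sum = w * (ns.count c : Int) := by
  intro ns
  induction ns with
  | nil => simp
  | cons n t ih =>
    simp only [List.map_cons, List.sum_cons, ih, List.count_cons, beq_iff_eq]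
    by_cases h : n = c
    · rw [if_pos h, if_pos h]
      push_cast
      ring
    · rw [if_neg h, if_neg h]
      push_cast
      ring

theorem sum_ite_pick (h : Int → Int) (n : Int) : ∀ (ks : List Int), ks.Nodup → n ∈ ks →
    (ks.map (fun k => if k = n then h k else 0)).sum = h n := by
  intro ks
  induction ks with
  | nil => intro _ hm; simp at hm
  | cons a t ih =>
    intro hnd hm
    simp only [List.map_cons, List.sum_cons]
    rcases List.mem_cons.mp hm with rfl | hmt
    · rw [if_pos rfl]
      have hz : (t.map (fun k => if k = n then h k else 0)).sum = 0 := by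
        apply List.sum_eq_zero
        intro x hx
        obtain ⟨k, hk, rfl⟩ := List.mem_map.mp hx
        rw [if_neg (by rintro rfl; exact (List.nodup_cons.mp hnd).1 hk)]
      rw [hz, add_zero]
    · rw [if_neg (by rintro rfl; exact (List.nodup_cons.mp hnd).1 hmt), zero_add]
      exact ih (List.nodup_cons.mp hnd).2 hmt

theorem sum_pick (x v : Int) : ∀ (l : List (Int × Int)), l.Pairwise (fun a b => a.1 ≠ b.1) → (x, v) ∈ l →
    (l.map (fun sw => if sw.1 = x then sw.2 else 0)).sum = v := by
  intro l
  induction l with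
  | nil => intro _ hm; simp at hm
  | cons a t ih =>
    intro hnd hm
    obtain ⟨hhead, htail⟩ := List.pairwise_cons.mp hnd
    simp only [List.map_cons, List.sum_cons]
    rcases List.mem_cons.mp hm with rfl | hmt
    · rw [if_pos rfl]
      have hz : (t.map (fun sw => if sw.1 = x then sw.2 else 0)).sum = 0 := by
        apply List.sum_eq_zero
        intro y hy
        obtain ⟨sw, hsw, rfl⟩ := List.mem_map.mp hy
        rw [if_neg (fun he => hhead sw hsw (by rw [he]))]
      rw [hz, add_zero]
    · rw [if_neg (fun he => hhead _ hmt (by rw [he])), zero_add]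
      exact ih htail hmt

theorem dedup_count_sum (ks : List Int) (h : Int → Int) (hnd : ks.Nodup) :
    ∀ (l : List Int), (∀ x ∈ l, x ∈ ks) →
    (ks.map (fun k => (l.count k : Int) * h k)).sum = (l.map h).sum := by
  intro l
  induction l with
  | nil =>
    intro _
    apply List.sum_eq_zero
    intro x hx
    obtain ⟨k, _, rfl⟩ := List.mem_map.mp hx
    simp
  | cons a t ih =>
    intro hmem
    have hsplit : (ks.map (fun k => ((a :: t).count k : Int) * h k))
        = ks.map (fun k => (t.count k : Int) * h k + (if k = a then h k else 0)) := by
      apply List.map_congr_left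
      intro k _
      rw [List.count_cons]
      simp only [beq_iff_eq]
      by_cases hk : k = a
      · rw [if_pos hk, if_pos hk.symm]
        push_cast
        ring
      · rw [if_neg hk, if_neg (fun hh => hk hh.symm)]
        push_cast
        ring
    rw [hsplit, PySem.List.sum_map_add_int, ih (fun x hx => hmem x (List.mem_cons_of_mem a hx)),
      sum_ite_pick h a ks hnd (hmem a (List.mem_cons_self))]
    simp only [List.map_cons, List.sum_cons]
    ring

-- ---- TreeMap basics ----
theorem tmGetD_insert (t : Std.TreeMap Int Int) (k v x : Int) :
    (t.insert k v).getD x 0 = if x = k then v else t.getD x 0 := by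
  rw [Std.TreeMap.getD_insert]
  by_cases h : x = k
  · rw [if_pos h, if_pos (Int.compare_eq_eq.mpr h.symm)]
  · rw [if_neg h, if_neg (fun hc => h (Int.compare_eq_eq.mp hc).symm)]

theorem tm_pairwise_fst (t : Std.TreeMap Int Int) : t.toList.Pairwise (fun a b => a.1 ≠ b.1) := by
  have hd := Std.TreeMap.distinct_keys_toList (t := t)
  exact hd.imp (fun hne he => hne (Int.compare_eq_eq.mpr (congrArg id he)))

theorem tm_getD_eq_toList_sum (t : Std.TreeMap Int Int) (x : Int) :
    t.getD x 0 = (t.toList.map (fun sw => if sw.1 = x then sw.2 else 0)).sum := by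
  rw [Std.TreeMap.getD_eq_getD_getElem?]
  cases h : t[x]? with
  | none =>
    simp only [Option.getD_none]
    symm
    apply List.sum_eq_zero
    intro y hy
    obtain ⟨sw, hsw, rfl⟩ := List.mem_map.mp hy
    rw [if_neg]
    intro he
    have hm : (x, sw.2) ∈ t.toList := by
      have : sw = (x, sw.2) := by rw [← he]
      rwa [this] at hsw
    rw [Std.TreeMap.mem_toList_iff_getElem?_eq_some.mp hm] at h
    cases h
  | some v =>
    simp only [Option.getD_some]
    exact (sum_pick x v t.toList (tm_pairwise_fst t) (Std.TreeMap.mem_toList_iff_getElem?_eq_some.mpr h)).symm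

theorem init_getD (s : Int) : ((∅ : Std.TreeMap Int Int).insert 0 1).getD s 0 = if s = 0 then 1 else 0 := by
  rw [tmGetD_insert, Std.TreeMap.getD_emptyc]

-- ---- cumWays recurrences ----
theorem cumWays_zero (nums : List Int) (s : Int) : cumWays nums 0 s = if s = 0 then 1 else 0 := by
  simp [cumWays, List.range_one, ways]

theorem cumWays_succ (nums : List Int) (k : Nat) (s : Int) :
    cumWays nums (k + 1) s = cumWays nums k s + ways nums (k + 1) s := by
  unfold cumWays
  rw [List.range_succ, List.map_append, List.sum_append]
  simp

theorem cumWays_rec (nums : List Int) (k : Nat) (x : Int) :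
    cumWays nums (k + 1) x = (if x = 0 then 1 else 0) + (nums.map (fun n => cumWays nums k (x - n))).sum := by
  have h1 : cumWays nums (k + 1) x
      = ways nums 0 x + ((List.range (k + 1)).map (fun l => (nums.map (fun n => ways nums l (x - n))).sum)).sum := by
    unfold cumWays
    rw [List.range_succ_eq_map]
    simp only [List.map_cons, List.sum_cons, List.map_map]
    rfl
  rw [h1, sum_swap (List.range (k + 1)) nums (fun l n => ways nums l (x - n))]
  show ways nums 0 x + _ = _
  simp only [ways]
  rfl

-- ---- A side ----
theorem inner_getD (ns : List Int) (s w x : Int) : ∀ (d : Std.TreeMap Int Int),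
    (ns.foldl (fun nx n => nx.insert (s + n) (nx.getD (s + n) 0 + w)) d).getD x 0
      = d.getD x 0 + w * (ns.count (x - s) : Int) := by
  induction ns with
  | nil => simp
  | cons n t ih =>
    intro d
    simp only [List.foldl_cons, ih, List.count_cons, beq_iff_eq, tmGetD_insert]
    by_cases h : x = s + n
    · rw [if_pos h, if_pos (by omega : n = x - s), h]
      push_cast
      ring
    · rw [if_neg h, if_neg (by omega : ¬ n = x - s)]
      push_cast
      ring

theorem outer_getD (nums : List Int) (x : Int) : ∀ (its : List (Int × Int)) (d : Std.TreeMap Int Int),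
    (its.foldl (fun nx sw => nums.foldl (fun nx n => nx.insert (sw.1 + n) (nx.getD (sw.1 + n) 0 + sw.2)) nx) d).getD x 0
      = d.getD x 0 + (its.map (fun sw => sw.2 * (nums.count (x - sw.1) : Int))).sum := by
  intro its
  induction its with
  | nil => simp
  | cons p t ih =>
    intro d
    simp only [List.foldl_cons, ih, inner_getD, List.map_cons, List.sum_cons]
    ring

theorem merge_getD (x : Int) : ∀ (its : List (Int × Int)) (c : Std.TreeMap Int Int),
    (its.foldl (fun c kv => c.insert kv.1 (c.getD kv.1 0 + kv.2)) c).getD x 0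
      = c.getD x 0 + (its.map (fun kv => if kv.1 = x then kv.2 else 0)).sum := by
  intro its
  induction its with
  | nil => simp
  | cons p t ih =>
    intro c
    simp only [List.foldl_cons, ih, tmGetD_insert, List.map_cons, List.sum_cons]
    by_cases h : x = p.1
    · rw [if_pos h, if_pos h.symm, h]
      ring
    · rw [if_neg h, if_neg (fun hh => h hh.symm)]
      ring

theorem aNext_getD (nums : List Int) (L : Nat) (curr : Std.TreeMap Int Int)
    (hval : ∀ s, curr.getD s 0 = ways nums L s) (x : Int) :
    (aNext nums curr).getD x 0 = ways nums (L + 1) x := by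
  unfold aNext
  rw [outer_getD, Std.TreeMap.getD_emptyc, zero_add]
  have h1 : ways nums (L + 1) x = (nums.map (fun n => (curr.toList.map (fun sw => if sw.1 = x - n then sw.2 else 0)).sum)).sum := by
    show (nums.map (fun n => ways nums L (x - n))).sum = _
    congr 1
    apply List.map_congr_left
    intro n _
    rw [← hval (x - n), tm_getD_eq_toList_sum curr]
  rw [h1, sum_swap]
  congr 1
  apply List.map_congr_left
  intro sw _
  have h2 : (nums.map (fun n => if sw.1 = x - n then sw.2 else 0)) = (nums.map (fun n => if n = x - sw.1 then sw.2 else 0)) := by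
    apply List.map_congr_left
    intro n _
    by_cases h : sw.1 = x - n
    · rw [if_pos h, if_pos (by omega : n = x - sw.1)]
    · rw [if_neg h, if_neg (by omega : ¬ n = x - sw.1)]
  rw [h2, sum_ite_count]

theorem aLoop_inv (nums : List Int) : ∀ k : Nat,
    (∀ s, (aLoop nums k).2.getD s 0 = ways nums k s)
      ∧ (∀ s, (aLoop nums k).1.getD s 0 = cumWays nums k s) := by
  intro k
  induction k with
  | zero =>
    constructor
    · intro s
      show ((∅ : Std.TreeMap Int Int).insert 0 1).getD s 0 = ways nums 0 s
      rw [init_getD]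
      simp [ways]
    · intro s
      show ((∅ : Std.TreeMap Int Int).insert 0 1).getD s 0 = cumWays nums 0 s
      rw [init_getD, cumWays_zero]
  | succ k ih =>
    obtain ⟨hcurr, hcum⟩ := ih
    have hnx : ∀ s, (aNext nums (aLoop nums k).2).getD s 0 = ways nums (k + 1) s :=
      aNext_getD nums k _ hcurr
    refine ⟨hnx, ?_⟩
    intro s
    show (aMerge (aLoop nums k).1 (aNext nums (aLoop nums k).2)).getD s 0 = _
    unfold aMerge
    rw [merge_getD, ← tm_getD_eq_toList_sum _ s, hnx, hcum, cumWays_succ]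

-- ---- B side ----
theorem binner_getD (m target n c x : Int) (hx : ¬(0 < m ∧ target < x)) :
    ∀ (its : List (Int × Int)) (d : Std.TreeMap Int Int),
    (its.foldl (fun ng sw => if 0 < m ∧ target < sw.1 + n then ng
        else ng.insert (sw.1 + n) (ng.getD (sw.1 + n) 0 + c * sw.2)) d).getD x 0
      = d.getD x 0 + c * (its.map (fun sw => if sw.1 = x - n then sw.2 else 0)).sum := by
  intro its
  induction its with
  | nil => simp
  | cons sw t ih =>
    intro d
    simp only [List.foldl_cons, List.map_cons, List.sum_cons]
    by_cases hg : 0 < m ∧ target < sw.1 + n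
    · rw [if_pos hg, ih, if_neg (fun h' => hx ⟨hg.1, by omega⟩), zero_add]
    · rw [if_neg hg, ih, tmGetD_insert]
      by_cases h : x = sw.1 + n
      · rw [if_pos h, if_pos (by omega), h]
        ring
      · rw [if_neg h, if_neg (by omega)]
        ring

theorem bouter_getD (m target x : Int) (g : Std.TreeMap Int Int) (hx : ¬(0 < m ∧ target < x)) :
    ∀ (mits : List (Int × Int)) (d : Std.TreeMap Int Int),
    (mits.foldl (fun ng nc => g.toList.foldl (fun ng sw => if 0 < m ∧ target < sw.1 + nc.1 then ng
        else ng.insert (sw.1 + nc.1) (ng.getD (sw.1 + nc.1) 0 + nc.2 * sw.2)) ng) d).getD x 0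
      = d.getD x 0 + (mits.map (fun nc => nc.2 * (g.toList.map (fun sw => if sw.1 = x - nc.1 then sw.2 else 0)).sum)).sum := by
  intro mits
  induction mits with
  | nil => simp
  | cons nc t ih =>
    intro d
    simp only [List.foldl_cons, ih, binner_getD m target nc.1 nc.2 x hx, List.map_cons, List.sum_cons]
    ring

theorem bMult_getD : ∀ (l : List Int) (d : Std.TreeMap Int Int) (v : Int),
    (l.foldl (fun d n => d.insert n (d.getD n 0 + 1)) d).getD v 0 = d.getD v 0 + (l.count v : Int) := by
  intro l
  induction l with
  | nil => simp
  | cons n t ih =>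
    intro d v
    simp only [List.foldl_cons, ih, List.count_cons, beq_iff_eq, tmGetD_insert]
    by_cases h : v = n
    · subst h
      rw [if_pos rfl, if_pos rfl]
      push_cast
      ring
    · rw [if_neg h, if_neg (fun hh => h hh.symm)]
      push_cast
      ring

theorem mult_toList_sum (nums : List Int) (f : Int → Int) :
    ((bMult nums).toList.map (fun nc => nc.2 * f nc.1)).sum = (nums.map f).sum := by
  have hget : ∀ v, (bMult nums).getD v 0 = (nums.count v : Int) := by
    intro v
    unfold bMult
    rw [bMult_getD nums ∅ v, Std.TreeMap.getD_emptyc, zero_add]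
  have hnd : ((bMult nums).toList.map (fun sw => sw.1)).Nodup :=
    (List.pairwise_map).mpr (tm_pairwise_fst (bMult nums))
  have h1 : ((bMult nums).toList.map (fun nc => nc.2 * f nc.1)).sum
      = (((bMult nums).toList.map (fun sw => sw.1)).map (fun k => ((nums.count k : Int)) * f k)).sum := by
    rw [List.map_map]
    congr 1
    apply List.map_congr_left
    intro sw hsw
    have hmem : (sw.1, sw.2) ∈ (bMult nums).toList := by
      rwa [show (sw.1, sw.2) = sw from rfl]
    have hv : (bMult nums)[sw.1]? = some sw.2 := Std.TreeMap.mem_toList_iff_getElem?_eq_some.mp hmem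
    have : sw.2 = (nums.count sw.1 : Int) := by
      rw [← hget sw.1, Std.TreeMap.getD_eq_getD_getElem?, hv]
      rfl
    show sw.2 * f sw.1 = (nums.count sw.1 : Int) * f sw.1
    rw [this]
  have hmem : ∀ x ∈ nums, x ∈ (bMult nums).toList.map (fun sw => sw.1) := by
    intro x hx
    have hc : (0 : Int) < (nums.count x : Int) := by
      have := List.count_pos_iff.mpr hx
      omega
    cases hv : (bMult nums)[x]? with
    | none =>
      exfalso
      have := hget x
      rw [Std.TreeMap.getD_eq_getD_getElem?, hv] at this
      simp at this
      omega
    | some c =>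
      have : (x, c) ∈ (bMult nums).toList := Std.TreeMap.mem_toList_iff_getElem?_eq_some.mpr hv
      exact List.mem_map.mpr ⟨(x, c), this, rfl⟩
  rw [h1, dedup_count_sum _ f hnd nums hmem]

theorem bStep_cum (nums : List Int) (m target : Int) (k : Nat) (g : Std.TreeMap Int Int)
    (hmin : ∀ n ∈ nums, m ≤ n)
    (hval : ∀ s, ¬(0 < m ∧ target < s) → g.getD s 0 = cumWays nums k s)
    (x : Int) (hx : ¬(0 < m ∧ target < x)) :
    (bStep m target (bMult nums) g).getD x 0 = cumWays nums (k + 1) x := by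
  unfold bStep
  rw [bouter_getD m target x g hx, init_getD]
  have hconv : ((bMult nums).toList.map (fun nc => nc.2 * (g.toList.map (fun sw => if sw.1 = x - nc.1 then sw.2 else 0)).sum)).sum
      = ((bMult nums).toList.map (fun nc => nc.2 * cumWays nums k (x - nc.1))).sum := by
    congr 1
    apply List.map_congr_left
    intro nc hnc
    have hv : (bMult nums)[nc.1]? = some nc.2 :=
      Std.TreeMap.mem_toList_iff_getElem?_eq_some.mp (by rwa [show (nc.1, nc.2) = nc from rfl])
    have hcnt : nc.2 = (nums.count nc.1 : Int) := by
      have hget : (bMult nums).getD nc.1 0 = (nums.count nc.1 : Int) := by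
        unfold bMult
        rw [bMult_getD nums ∅ nc.1, Std.TreeMap.getD_emptyc, zero_add]
      rw [← hget, Std.TreeMap.getD_eq_getD_getElem?, hv]
      rfl
    by_cases hn : nc.1 ∈ nums
    · have hcond : ¬(0 < m ∧ target < x - nc.1) := by
        rintro ⟨hm0, hlt⟩
        have := hmin nc.1 hn
        exact hx ⟨hm0, by omega⟩
      rw [← tm_getD_eq_toList_sum g (x - nc.1), hval (x - nc.1) hcond]
    · have hz : nc.2 = 0 := by
        rw [hcnt, List.count_eq_zero_of_not_mem hn]
        rfl
      rw [hz, zero_mul, zero_mul]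
  rw [hconv, mult_toList_sum nums (fun n => cumWays nums k (x - n)), cumWays_rec]

theorem bLoop_inv (nums : List Int) (m target : Int) (hmin : ∀ n ∈ nums, m ≤ n) : ∀ k : Nat,
    ∀ s, ¬(0 < m ∧ target < s) → (bLoop m target (bMult nums) k).getD s 0 = cumWays nums k s := by
  intro k
  induction k with
  | zero =>
    intro s _
    show ((∅ : Std.TreeMap Int Int).insert 0 1).getD s 0 = _
    rw [init_getD, cumWays_zero]
  | succ k ih =>
    intro s hs
    exact bStep_cum nums m target k _ hmin ih s hs

theorem main_eq (nums : List Int) (target : Int) (hne : nums ≠ []) :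
    count_ordered_sums_unbounded nums target = count_ordered_sums_unbounded_alt nums target := by
  obtain ⟨m, hm⟩ : ∃ m, PySem.List.min? nums (fun x => x) = some m := by
    cases h : PySem.List.min? nums (fun x => x) with
    | none => exact absurd ((PySem.List.min?_eq_none_iff _ _).mp h) hne
    | some m => exact ⟨m, rfl⟩
  have hmin : ∀ y ∈ nums, m ≤ y := PySem.List.min?_isMin hm
  have hA : count_ordered_sums_unbounded nums target
      = cumWays nums (PySem.Int.floordiv target m).toNat target := by
    unfold count_ordered_sums_unbounded
    rw [hm]
    exact ((aLoop_inv nums _).2 target)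
  have hsteps : (max 0 (PySem.Int.floordiv target m)).toNat = (PySem.Int.floordiv target m).toNat := by
    rcases le_total 0 (PySem.Int.floordiv target m) with h | h
    · rw [max_eq_right h]
    · rw [max_eq_left h]
      omega
  have hB : count_ordered_sums_unbounded_alt nums target
      = cumWays nums (PySem.Int.floordiv target m).toNat target := by
    unfold count_ordered_sums_unbounded_alt
    rw [hm]
    show (bLoop m target (bMult nums) (max 0 (PySem.Int.floordiv target m)).toNat).getD target 0 = _
    rw [hsteps]
    exact bLoop_inv nums m target hmin _ target (fun h => lt_irrefl _ h.2)
  rw [hA, hB]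

-- ===== VERDICT =====
theorem count_ordered_sums_unbounded_spec : Claim_equal_count_ordered_sums_unbounded := by
  intro nums target _ hpre
  show count_ordered_sums_unbounded nums target = count_ordered_sums_unbounded_alt nums target
  exact main_eq nums target hpre.1
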